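-- pv_equiv track=rewrite | github.com/SolchagaJ/Formation | Formation Python/Problem Sets/Problem Set 2. Loops/plates.py | good_digits_placement
-- ===== SOURCE A (Python) =====
-- def good_digits_placement(s):
--     # On continue tant qu'on ne tombe pas sur un chiffre
--     for i in range(len(s)):
--         # Dès qu'on trouve un chiffre, les autres caractères doivent être des chiffres
--         if s[i].isdigit():
--             for i in range(i+1,len(s)):
--                 if not s[i].isdigit():
--                     return False
--             return True
--     return True # Renvoie True si aucun chiffre
-- ===== SOURCE B (Python) =====
-- def good_digits_placement(s):
--     # digits form a suffix block iff the digit-mask is nondecreasing (no True before a False)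
--     mask = [c.isdigit() for c in s]
--     return mask == sorted(mask)
-- ===== Notes on version B (the rewrite author's own statement) =====
-- stated objective: alternative
-- what changed: Replaces the find-first-digit outer loop with nested verify loop by building the boolean digit-mask and checking it equals its sorted version (the mask is nondecreasing exactly when all digits form a suffix block).
import Mathlib
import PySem

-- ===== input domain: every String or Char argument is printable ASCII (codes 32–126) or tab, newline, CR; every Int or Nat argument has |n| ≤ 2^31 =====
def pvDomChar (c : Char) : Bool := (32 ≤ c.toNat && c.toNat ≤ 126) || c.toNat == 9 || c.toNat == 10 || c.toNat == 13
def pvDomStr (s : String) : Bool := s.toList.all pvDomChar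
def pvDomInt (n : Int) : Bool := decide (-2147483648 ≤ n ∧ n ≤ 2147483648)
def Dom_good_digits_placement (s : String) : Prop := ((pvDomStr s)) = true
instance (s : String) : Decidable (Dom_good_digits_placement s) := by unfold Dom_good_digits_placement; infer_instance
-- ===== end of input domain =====

-- B replaces A's find-first-digit / verify-rest nested loops by a digit-mask compared with its
-- sorted version (the mask is nondecreasing exactly when the digits form a suffix block); objective: alternative.


-- ===== PORT A =====
-- inner loop: for i in range(i+1, len(s)): if not s[i].isdigit(): return False / return True
def goodInnerA : List Char → Bool
  | [] => true
  | c :: t => if ¬ (PySem.Chars.isdigit c = true) then false else goodInnerA t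

-- outer loop: for i in range(len(s)): if s[i].isdigit(): <inner> / return True
def goodOuterA : List Char → Bool
  | [] => true
  | c :: t => if PySem.Chars.isdigit c then goodInnerA t else goodOuterA t

def good_digits_placement (s : String) : Bool := goodOuterA s.toList

-- ===== PORT B =====
def good_digits_placement_alt (s : String) : Bool :=
  let mask := s.toList.map PySem.Chars.isdigit
  mask == PySem.List.sorted mask (fun x => x) false

-- ===== PRECONDITION & SPEC =====
def Spec_good_digits_placement (s : String) (out : Bool) : Prop := out = good_digits_placement_alt s
instance (s : String) (out : Bool) : Decidable (Spec_good_digits_placement s out) := by unfold Spec_good_digits_placement; infer_instance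

-- ===== CLAIM (what is proved, stated in full; the proofs are below) =====
def Claim_equal_good_digits_placement : Prop := ∀ (s : String), Dom_good_digits_placement s → Spec_good_digits_placement s (good_digits_placement s)

-- ===== LEMMAS AND PROOFS =====

-- a Bool list equals its sorted version iff it is nondecreasing
theorem eq_sorted_iff_pairwise (l : List Bool) :
    (l == PySem.List.sorted l (fun x => x) false) = decide (l.Pairwise (fun a b => a ≤ b)) := by
  by_cases h : l.Pairwise (fun a b => a ≤ b)
  · simp [h, PySem.List.sorted_eq_self_of_pairwise l (fun x => x) h]
  · simp only [h, decide_false, beq_eq_false_iff_ne, ne_eq]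
    intro he
    exact h (by simpa using he ▸ PySem.List.sorted_pairwise l (fun x => x))

theorem goodInnerA_eq_all (t : List Char) :
    goodInnerA t = t.all (fun c => PySem.Chars.isdigit c) := by
  induction t with
  | nil => rfl
  | cons c t ih => by_cases h : PySem.Chars.isdigit c = true <;> simp [goodInnerA, h, ih]

theorem goodOuterA_eq_pairwise (l : List Char) :
    goodOuterA l = decide ((l.map PySem.Chars.isdigit).Pairwise (fun a b => a ≤ b)) := by
  induction l with
  | nil => rfl
  | cons c t ih =>
    by_cases h : PySem.Chars.isdigit c = true
    · simp only [goodOuterA, h, if_true, goodInnerA_eq_all, List.map_cons, List.pairwise_cons]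
      by_cases hall : ∀ x ∈ t, PySem.Chars.isdigit x = true
      · have hp : (t.map PySem.Chars.isdigit).Pairwise (fun a b => a ≤ b) := by
          refine List.Pairwise.map _ (fun a b hab => hab) ?_
          refine List.pairwise_of_forall_mem_list ?_
          intro a ha b hb; simp [hall b hb]
        have h1 : t.all (fun c => PySem.Chars.isdigit c) = true := by
          simpa [List.all_eq_true] using hall
        rw [h1]
        refine (decide_eq_true ⟨?_, hp⟩).symm
        intro a ha
        obtain ⟨x, hx, rfl⟩ := List.mem_map.mp ha
        rw [hall x hx]
      · obtain ⟨x, hx, hxd⟩ := not_forall₂.mp hall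
        have h1 : t.all (fun c => PySem.Chars.isdigit c) = false := by
          simp only [List.all_eq_false]
          exact ⟨x, hx, by simpa using hxd⟩
        rw [h1]
        refine (decide_eq_false ?_).symm
        rintro ⟨hfa, -⟩
        have := hfa _ (List.mem_map_of_mem hx)
        exact hxd (le_antisymm this (Bool.le_true _)).symm
    · have hf : PySem.Chars.isdigit c = false := by simpa using h
      simp only [goodOuterA, hf, Bool.false_eq_true, if_false, List.map_cons,
        List.pairwise_cons, ih]
      rw [decide_eq_decide]
      refine (and_iff_right ?_).symm
      intro a _
      exact Bool.false_le a

-- ===== VERDICT (by name: the statement is the Claim_ definition above) =====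
theorem good_digits_placement_spec : Claim_equal_good_digits_placement := by
  intro s _
  unfold Spec_good_digits_placement good_digits_placement good_digits_placement_alt
  rw [goodOuterA_eq_pairwise, eq_sorted_iff_pairwise]
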